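-- pv_equiv track=rewrite | github.com/venkatesh21bit/Python-problems | Lab evaluation sec c QP.py | longest_subject_name_recursive
-- ===== SOURCE A (Python) =====
-- def longest_subject_name_recursive(Subjects):
--
--     if not Subjects:
--         return None
--     elif len(Subjects) == 1:
--         return Subjects[0]
--     else:
--         first_subject = Subjects[0]
--         rest_subjects = Subjects[1:]
--         longest_in_rest = longest_subject_name_recursive(rest_subjects)
--         return first_subject if len(first_subject) > len(longest_in_rest) else longest_in_rest
-- ===== SOURCE B (Python) =====
-- def longest_subject_name_recursive(Subjects):
--     best = None
--     for s in Subjects: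
--         if best is None or len(s) >= len(best):
--             best = s
--     return best
-- ===== Notes on version B (the rewrite author's own statement) =====
-- stated objective: faster
-- what changed: Replaced the O(n^2) slice-based recursion with a single linear fold that keeps the latest element of maximal length.
import Mathlib
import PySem

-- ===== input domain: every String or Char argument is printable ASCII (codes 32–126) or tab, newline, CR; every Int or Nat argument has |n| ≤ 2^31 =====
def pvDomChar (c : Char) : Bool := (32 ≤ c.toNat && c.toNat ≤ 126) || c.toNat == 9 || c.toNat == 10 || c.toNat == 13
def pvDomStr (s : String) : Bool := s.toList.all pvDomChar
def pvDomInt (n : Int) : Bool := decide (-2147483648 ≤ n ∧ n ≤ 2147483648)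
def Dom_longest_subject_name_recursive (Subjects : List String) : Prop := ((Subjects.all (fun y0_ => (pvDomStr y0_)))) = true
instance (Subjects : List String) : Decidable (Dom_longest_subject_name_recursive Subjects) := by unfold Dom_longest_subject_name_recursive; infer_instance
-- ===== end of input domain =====

-- ===== PORT A =====
-- B replaces the quadratic slice-based recursion with a single linear fold (objective: faster).
def longest_subject_name_recursive (Subjects : List String) : Option String :=
  match Subjects with
  | [] => none
  | [x] => some x
  | first_subject :: rest_subjects =>
    match longest_subject_name_recursive rest_subjects with
    | some longest_in_rest =>
        if PySem.Str.len first_subject > PySem.Str.len longest_in_rest then some first_subject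
        else some longest_in_rest
    | none => none  -- unreachable: the recursive call on a nonempty list never returns none

-- ===== PORT B =====
def pvStep (best : Option String) (s : String) : Option String :=
  match best with
  | none => some s
  | some b => if PySem.Str.len s ≥ PySem.Str.len b then some s else some b

def longest_subject_name_recursive_alt (Subjects : List String) : Option String :=
  Subjects.foldl pvStep none

-- ===== PRECONDITION & SPEC =====
def Spec_longest_subject_name_recursive (Subjects : List String) (out : Option String) : Prop := out = longest_subject_name_recursive_alt Subjects
instance (Subjects : List String) (out : Option String) : Decidable (Spec_longest_subject_name_recursive Subjects out) := by unfold Spec_longest_subject_name_recursive; infer_instance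

-- ===== CLAIM (what is proved, stated in full; the proofs are below) =====
def Claim_equal_longest_subject_name_recursive : Prop := ∀ (Subjects : List String), Dom_longest_subject_name_recursive Subjects → Spec_longest_subject_name_recursive Subjects (longest_subject_name_recursive Subjects)

-- ===== LEMMAS AND PROOFS =====

-- ===== VERDICT (by name: the statement is the Claim_ definition above) =====
theorem pv_ne_none (x : String) (t : List String) :
    longest_subject_name_recursive (x :: t) ≠ none := by
  induction t generalizing x with
  | nil => simp [longest_subject_name_recursive]
  | cons y t2 ih =>
    simp only [longest_subject_name_recursive]
    cases h : longest_subject_name_recursive (y :: t2) with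
    | none => exact absurd h (ih y)
    | some w => simp only []; split_ifs <;> simp

theorem pv_step_some (b x : String) :
    pvStep (some b) x = some (if PySem.Str.len x ≥ PySem.Str.len b then x else b) := by
  simp only [pvStep]; split_ifs <;> rfl

-- foldl from state `some b` is `A xs` merged with b by the tie-favouring-later rule
theorem pv_foldl_some (xs : List String) (b : String) :
    xs.foldl pvStep (some b) =
      match longest_subject_name_recursive xs with
      | none => some b
      | some z => some (if PySem.Str.len b > PySem.Str.len z then b else z) := by
  induction xs generalizing b with
  | nil => simp [longest_subject_name_recursive]
  | cons x rest ih =>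
    rw [List.foldl_cons, pv_step_some, ih]
    cases rest with
    | nil => simp only [longest_subject_name_recursive]; split_ifs <;> first | rfl | omega
    | cons y t =>
      obtain ⟨z, hz⟩ := Option.ne_none_iff_exists'.mp (pv_ne_none y t)
      simp only [longest_subject_name_recursive, hz]
      split_ifs <;> simp only [] <;> (try split_ifs) <;> first | rfl | (exfalso; omega)

theorem longest_subject_name_recursive_spec : Claim_equal_longest_subject_name_recursive := by
  intro Subjects _
  unfold Spec_longest_subject_name_recursive longest_subject_name_recursive_alt
  cases Subjects with
  | nil => rfl
  | cons x rest =>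
    simp only [List.foldl_cons, pvStep, pv_foldl_some rest x]
    cases h : longest_subject_name_recursive rest with
    | none =>
      cases rest with
      | nil => simp [longest_subject_name_recursive]
      | cons y t => exact absurd h (pv_ne_none y t)
    | some z =>
      cases rest with
      | nil => simp [longest_subject_name_recursive] at h
      | cons y t =>
        simp only [longest_subject_name_recursive, h]
        split_ifs <;> rfl
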